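-- pv_equiv track=rewrite | github.com/aim-tello/algoritmos-combinatorios-tarea-2 | src/algoritmos_combinatorios_tarea_2/ejercicio_12.py | perm_lex_unrank
-- ===== SOURCE A (Python) =====
-- import math
-- from typing import List
--
-- def perm_lex_unrank(n: int, r: int) -> List[int]:
--     """
--     Genera la permutación de tamaño n correspondiente al rango lexicográfico r.
--     :param n: Cardinalidad del conjunto subyacente.
--     :param r: Rango objetivo (0 <= r < n!).
--     :return: Lista representativa de la permutación pi.
--     """
--     pi = [0] * n
--     # Inicialización del último elemento (índice n-1 en Python)
--     pi[n - 1] = 1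
--
--     # Extracción en base factorial (j itera de 1 a n-1)
--     for j in range(1, n):
--         fact_j = math.factorial(j)
--         fact_j_plus_1 = math.factorial(j + 1)
--
--         # Aislamiento del dígito d asociado a la base j!
--         d = (r % fact_j_plus_1) // fact_j
--         r -= d * fact_j
--
--         # Inserción del elemento relativo (índice n - 1 - j en Python)
--         pi[n - 1 - j] = d + 1
--
--         # Desplazamiento de los elementos a la derecha para mantener la biyección
--         for i in range(n - j, n):
--             if pi[i] > d:
--                 pi[i] += 1
--
--     return pi
-- ===== SOURCE B (Python) =====
-- import math
-- from typing import List
--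
-- def perm_lex_unrank(n: int, r: int) -> List[int]:
--     # Decode the factorial digits of r directly (d_j = (r // j!) % (j+1)) and
--     # pick the d-th smallest still-unused value, instead of A's relative-rank
--     # insertion with an inner shifting pass.
--     fact = math.factorial(n - 1) if n > 1 else 1
--     avail = list(range(1, n + 1))
--     out: List[int] = []
--     for j in range(n - 1, 0, -1):
--         d = (r // fact) % (j + 1)
--         out.append(avail.pop(d))
--         fact //= j
--     out.extend(avail)
--     return out
-- ===== Notes on version B (the rewrite author's own statement) =====
-- stated objective: faster
-- what changed: B decodes each factorial digit of r directly as (r // j!) % (j+1) with the factorial maintained incrementally by one division per step, and builds the permutation left-to-right by popping the d-th smallest unused value, instead of A's two math.factorial calls per iteration plus an inner relative-rank shifting pass over the suffix.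
import Mathlib
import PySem

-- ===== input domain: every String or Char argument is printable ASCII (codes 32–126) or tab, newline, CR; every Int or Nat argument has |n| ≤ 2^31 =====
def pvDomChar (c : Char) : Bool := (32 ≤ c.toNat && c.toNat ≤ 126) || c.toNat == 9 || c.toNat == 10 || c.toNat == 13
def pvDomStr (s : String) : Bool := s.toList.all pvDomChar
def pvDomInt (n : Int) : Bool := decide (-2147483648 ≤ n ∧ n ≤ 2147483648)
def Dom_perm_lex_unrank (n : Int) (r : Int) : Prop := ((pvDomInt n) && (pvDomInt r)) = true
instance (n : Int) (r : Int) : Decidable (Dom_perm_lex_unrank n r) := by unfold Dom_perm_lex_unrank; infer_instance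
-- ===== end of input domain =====

-- B replaces A's relative-rank insertion (with an inner shifting pass and two
-- math.factorial calls per step) by decoding each factorial digit of r directly
-- and popping the d-th smallest unused value, maintaining the factorial
-- incrementally; measured faster at the large sizes.

def pyFactorial (j : Int) : Int := (Nat.factorial j.toNat : Int)

-- ===== PORT A =====
-- inner loop body: 'if pi[i] > d: pi[i] += 1'
def permShiftStep (d : Int) : List Int → Int → List Int := fun pi i =>
  if PySem.List.pyGetD pi i 0 > d
  then PySem.List.pySetD pi i (PySem.List.pyGetD pi i 0 + 1) else pi

-- body of 'for j in range(1, n)': state (pi, r)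
def permAStep (n : Int) : (List Int × Int) → Int → (List Int × Int) := fun s j =>
  let fact_j := pyFactorial j
  let fact_j1 := pyFactorial (j + 1)
  let d := PySem.Int.floordiv (PySem.Int.mod s.2 fact_j1) fact_j
  let r' := s.2 - d * fact_j
  let pi1 := PySem.List.pySetD s.1 (n - 1 - j) (d + 1)
  let pi2 := (PySem.List.pyRange (n - j) n 1).foldl (permShiftStep d) pi1
  (pi2, r')

def perm_lex_unrank (n : Int) (r : Int) : List Int :=
  let pi0 := PySem.List.pySetD (List.replicate n.toNat (0 : Int)) (n - 1) 1
  ((PySem.List.pyRange 1 n 1).foldl (permAStep n) (pi0, r)).1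

-- ===== PORT B =====
-- body of 'for j in range(n-1, 0, -1)': state (out, avail, fact)
def permBStep (r : Int) : (List Int × List Int × Int) → Int → (List Int × List Int × Int) := fun s j =>
  let d := PySem.Int.mod (PySem.Int.floordiv r s.2.2) (j + 1)
  match PySem.List.pop? s.2.1 d with
  | some (v, rest) => (s.1 ++ [v], rest, PySem.Int.floordiv s.2.2 j)
  | none => (s.1, s.2.1, PySem.Int.floordiv s.2.2 j)  -- IndexError; never reached (0 ≤ d ≤ j < len(avail))

def perm_lex_unrank_alt (n : Int) (r : Int) : List Int :=
  let fact : Int := if n > 1 then pyFactorial (n - 1) else 1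
  let avail := PySem.List.pyRange 1 (n + 1) 1
  let res := (PySem.List.pyRange (n - 1) 0 (-1)).foldl (permBStep r) (([] : List Int), avail, fact)
  res.1 ++ res.2.1

-- ===== PRECONDITION & SPEC =====
-- Pre_ excludes exactly n ≤ 0, where A's 'pi[n-1] = 1' on the empty list raises IndexError.
def Pre_perm_lex_unrank (n : Int) (r : Int) : Prop := 1 ≤ n
instance (n : Int) (r : Int) : Decidable (Pre_perm_lex_unrank n r) := by unfold Pre_perm_lex_unrank; infer_instance
def pvWitness_perm_lex_unrank : Int × Int := (3, 4)

def Spec_perm_lex_unrank (n : Int) (r : Int) (out : List Int) : Prop := out = perm_lex_unrank_alt n r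
instance (n : Int) (r : Int) (out : List Int) : Decidable (Spec_perm_lex_unrank n r out) := by unfold Spec_perm_lex_unrank; infer_instance

-- ===== CLAIM (what is proved, stated in full; the proofs are below) =====
def Claim_equal_perm_lex_unrank : Prop := ∀ (n : Int) (r : Int), Dom_perm_lex_unrank n r → Pre_perm_lex_unrank n r → Spec_perm_lex_unrank n r (perm_lex_unrank n r)

-- ===== LEMMAS AND PROOFS =====

-- the j-th factorial digit of r (Python floor semantics; divisors positive, so Euclidean = floor)
def permDig (r : Int) (j : Nat) : Int := (r / (Nat.factorial j : Int)) % ((j : Int) + 1)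

-- A's suffix after j steps, in "relative rank" form over {1..j+1}
def permRel (r : Int) : Nat → List Int
  | 0 => [1]
  | j + 1 => (permDig r (j+1) + 1) ::
      (permRel r j).map (fun x => if x > permDig r (j+1) then x + 1 else x)

-- B's selection process: pop digit-indexed elements, then the leftover
def permSel (r : Int) : Nat → List Int → List Int
  | 0, L => L
  | j + 1, L => L.getD (permDig r (j+1)).toNat 0 ::
      permSel r j (L.eraseIdx (permDig r (j+1)).toNat)

theorem permDig_nonneg (r : Int) (j : Nat) : 0 ≤ permDig r j := by
  have : (0:Int) < (j:Int) + 1 := by positivity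
  exact Int.emod_nonneg _ (by omega)

theorem permDig_lt (r : Int) (j : Nat) : permDig r j < (j:Int) + 1 :=
  Int.emod_lt_of_pos _ (by positivity)

theorem emod_mul_decomp (r F k : Int) (hF : 0 < F) (hk : 0 < k) :
    r % (F * k) = r % F + F * ((r / F) % k) := by
  have h1 : r / (F * k) = r / F / k := (Int.ediv_ediv_of_nonneg (le_of_lt hF)).symm
  have e1 : F * (r / F) + r % F = r := Int.mul_ediv_add_emod r F
  have e2 : k * (r / F / k) + (r / F) % k = r / F := Int.mul_ediv_add_emod (r / F) k
  have e3 : (F * k) * (r / (F * k)) + r % (F * k) = r := Int.mul_ediv_add_emod r (F * k)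
  rw [h1] at e3
  nlinarith [e1, e2, e3]

theorem permRel_length (r : Int) (j : Nat) : (permRel r j).length = j + 1 := by
  induction j with
  | zero => rfl
  | succ j ih => simp [permRel, ih]

theorem permRel_bounds (r : Int) (j : Nat) : ∀ x ∈ permRel r j, 1 ≤ x ∧ x ≤ (j:Int) + 1 := by
  induction j with
  | zero => simp [permRel]
  | succ j ih =>
    intro x hx
    have hd0 := permDig_nonneg r (j+1)
    have hd1 := permDig_lt r (j+1)
    simp only [permRel, List.mem_cons, List.mem_map] at hx
    rcases hx with h | ⟨y, hy, rfl⟩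
    · push_cast; omega
    · have := ih y hy
      split_ifs with h <;> push_cast <;> push_cast at this hd1 <;> omega

theorem permSel_eq_map (r : Int) (j : Nat) : ∀ L : List Int, L.length = j + 1 →
    permSel r j L = (permRel r j).map (fun x => L.getD (x.toNat - 1) 0) := by
  induction j with
  | zero =>
    intro L hL
    match L, hL with
    | [x], _ => simp [permSel, permRel]
  | succ j ih =>
    intro L hL
    have hd0 := permDig_nonneg r (j+1)
    have hd1 := permDig_lt r (j+1)
    have hd1' : (permDig r (j+1)).toNat < j + 2 := by push_cast at hd1; omega
    simp only [permSel, permRel, List.map_cons, List.map_map]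
    refine congrArg₂ _ ?_ ?_
    · congr 1
      omega
    · rw [ih (L.eraseIdx (permDig r (j+1)).toNat) (by rw [List.length_eraseIdx]; split_ifs <;> omega)]
      refine List.map_congr_left ?_
      intro x hx
      obtain ⟨hx1, hx2⟩ := permRel_bounds r j x hx
      simp only [Function.comp_apply]
      by_cases hcmp : x > permDig r (j+1)
      · rw [if_pos hcmp]
        rw [List.getD_eq_getElem?_getD, List.getD_eq_getElem?_getD,
            List.getElem?_eraseIdx_of_ge (by omega)]
        congr 2
        omega
      · rw [if_neg hcmp]
        rw [List.getD_eq_getElem?_getD, List.getD_eq_getElem?_getD,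
            List.getElem?_eraseIdx_of_lt (by omega)]

-- A's inner shifting loop maps the shift over the suffix
theorem shift_loop (d : Int) : ∀ (S P : List Int),
    (PySem.List.pyRange (P.length : Int) ((P.length : Int) + (S.length : Int)) 1).foldl
      (permShiftStep d) (P ++ S)
    = P ++ S.map (fun x => if x > d then x + 1 else x) := by
  intro S
  induction S with
  | nil => intro P; rw [PySem.List.pyRange_one_eq_nil (by simp)]; simp
  | cons x S ih =>
    intro P
    have hlt : (P.length : Int) < (P.length : Int) + ((x :: S).length : Int) := by
      simp
    rw [PySem.List.pyRange_one_cons hlt]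
    simp only [List.foldl_cons]
    have hget : PySem.List.pyGetD (P ++ x :: S) (P.length : Int) 0 = x := by
      simp [PySem.List.pyGetD_natCast, List.getD_eq_getElem?_getD]
    have hstep : permShiftStep d (P ++ x :: S) (P.length : Int)
        = (P ++ [if x > d then x + 1 else x]) ++ S := by
      unfold permShiftStep
      rw [hget]
      split_ifs with h
      · rw [PySem.List.pySetD_natCast]
        have : (P ++ x :: S) = (P ++ [x]) ++ S := by simp
        rw [this, List.set_append_left _ _ (by simp),
            List.set_append_right _ _ (by simp)]
        simp
      · simp
    rw [hstep]
    have harg1 : (P.length : Int) + 1 = (((P ++ [if x > d then x + 1 else x]).length : Nat) : Int) := by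
      simp
    have harg2 : (P.length : Int) + ((x :: S).length : Int)
        = (((P ++ [if x > d then x + 1 else x]).length : Nat) : Int) + (S.length : Int) := by
      simp; push_cast; ring
    rw [harg1, harg2, ih]
    simp

-- A's outer loop invariant
theorem A_loop (m : Nat) (r : Int) : ∀ (k j : Nat), j + k = m → 1 ≤ j →
    ((PySem.List.pyRange (j:Int) (m:Int) 1).foldl (permAStep (m:Int))
      (List.replicate k 0 ++ permRel r (j-1), r - r % (Nat.factorial j : Int))).1
    = permRel r (m-1) := by
  intro k
  induction k with
  | zero =>
    intro j hjk h1
    have hj : j = m := by omega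
    subst hj
    rw [PySem.List.pyRange_one_eq_nil (le_refl _)]
    simp
  | succ k ih =>
    intro j hjk h1
    have hFpos : (0:Int) < ((Nat.factorial j : Nat) : Int) := by
      exact_mod_cast Nat.factorial_pos j
    have hjm : ((j:Nat):Int) < ((m:Nat):Int) := by exact_mod_cast (by omega : j < m)
    rw [PySem.List.pyRange_one_cons hjm, List.foldl_cons]
    have hfact1 : ((Nat.factorial (j+1) : Nat) : Int)
        = ((Nat.factorial j : Nat) : Int) * (((j:Nat):Int) + 1) := by
      rw [Nat.factorial_succ]; push_cast; ring
    have hd : PySem.Int.floordiv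
        (PySem.Int.mod (r - r % ((Nat.factorial j : Nat) : Int)) (pyFactorial (((j:Nat):Int) + 1)))
        ((Nat.factorial j : Nat) : Int) = permDig r j := by
      have hpf1 : pyFactorial (((j:Nat):Int) + 1) = ((Nat.factorial (j+1) : Nat) : Int) := by
        rw [show ((j:Nat):Int) + 1 = ((j+1 : Nat):Int) from by push_cast; ring]
        simp [pyFactorial]
      rw [hpf1, hfact1]
      have hq : r - r % ((Nat.factorial j : Nat) : Int)
          = ((Nat.factorial j : Nat) : Int) * (r / ((Nat.factorial j : Nat) : Int)) := by
        have := Int.mul_ediv_add_emod r ((Nat.factorial j : Nat) : Int)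
        linarith
      rw [PySem.Int.mod_eq_emod_of_pos (by positivity), hq,
          Int.mul_emod_mul_of_pos _ _ hFpos,
          PySem.Int.floordiv_eq_ediv_of_pos hFpos,
          Int.mul_ediv_cancel_left _ (by positivity)]
      rfl
    have hr' : r - r % ((Nat.factorial j : Nat) : Int) - permDig r j * ((Nat.factorial j : Nat) : Int)
        = r - r % ((Nat.factorial (j+1) : Nat) : Int) := by
      have hdec := emod_mul_decomp r ((Nat.factorial j : Nat) : Int) (((j:Nat):Int) + 1)
        hFpos (by positivity)
      rw [hfact1]
      unfold permDig
      unfold permDig at hdec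
      linarith
    have hset : PySem.List.pySetD (List.replicate (k+1) 0 ++ permRel r (j-1))
        (((m:Nat):Int) - 1 - ((j:Nat):Int)) (permDig r j + 1)
        = (List.replicate k 0 ++ [permDig r j + 1]) ++ permRel r (j-1) := by
      have hki : ((m:Nat):Int) - 1 - ((j:Nat):Int) = ((k:Nat):Int) := by push_cast; omega
      rw [hki, PySem.List.pySetD_natCast, List.replicate_succ',
          List.set_append_left _ _ (by simp),
          List.set_append_right _ _ (by simp)]
      simp
    have hshift : (PySem.List.pyRange (((m:Nat):Int) - ((j:Nat):Int)) ((m:Nat):Int) 1).foldl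
        (permShiftStep (permDig r j))
        ((List.replicate k 0 ++ [permDig r j + 1]) ++ permRel r (j-1))
        = (List.replicate k 0 ++ [permDig r j + 1])
          ++ (permRel r (j-1)).map (fun x => if x > permDig r j then x + 1 else x) := by
      have hlen : ((List.replicate k (0:Int) ++ [permDig r j + 1]).length : Int) = ((k:Nat):Int) + 1 := by
        simp
      have ha : ((m:Nat):Int) - ((j:Nat):Int)
          = ((List.replicate k (0:Int) ++ [permDig r j + 1]).length : Int) := by
        rw [hlen]; push_cast; omega
      have hb : ((m:Nat):Int)
          = ((List.replicate k (0:Int) ++ [permDig r j + 1]).length : Int)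
            + ((permRel r (j-1)).length : Int) := by
        rw [hlen, permRel_length]; push_cast; omega
      rw [ha, hb, shift_loop]
    have hrel : permRel r j = (permDig r j + 1) ::
        (permRel r (j-1)).map (fun x => if x > permDig r j then x + 1 else x) := by
      conv_lhs => rw [show j = (j-1)+1 by omega]
      rw [permRel, show j - 1 + 1 = j from by omega]
    have hstep : permAStep ((m:Nat):Int)
        (List.replicate (k+1) 0 ++ permRel r (j-1), r - r % ((Nat.factorial j : Nat) : Int)) ((j:Nat):Int)
        = (List.replicate k 0 ++ permRel r j, r - r % ((Nat.factorial (j+1) : Nat) : Int)) := by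
      unfold permAStep
      have hpf : pyFactorial ((j:Nat):Int) = ((Nat.factorial j : Nat) : Int) := by
        simp [pyFactorial]
      simp only [hpf, hd, hset, hshift, hrel, hr']
      simp
    rw [hstep]
    have := ih (j+1) (by omega) (by omega)
    rw [show ((j+1 : Nat):Int) = ((j:Nat):Int) + 1 from by push_cast; ring,
        show j + 1 - 1 = j from by omega] at this
    exact this

-- B's loop computes permSel
theorem B_loop (r : Int) : ∀ (j : Nat) (out L : List Int), L.length = j + 1 →
    (((PySem.List.pyRange (j:Int) 0 (-1)).foldl (permBStep r)
        (out, L, (Nat.factorial j : Int))).1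
     ++ ((PySem.List.pyRange (j:Int) 0 (-1)).foldl (permBStep r)
        (out, L, (Nat.factorial j : Int))).2.1)
    = out ++ permSel r j L := by
  intro j
  induction j with
  | zero =>
    intro out L hL
    rw [PySem.List.pyRange_neg_one_eq_nil (by simp)]
    simp [permSel]
  | succ j ih =>
    intro out L hL
    have hfpos : (0:Int) < ((Nat.factorial (j+1) : Nat) : Int) := by
      exact_mod_cast Nat.factorial_pos (j+1)
    have hd0 := permDig_nonneg r (j+1)
    have hd1 := permDig_lt r (j+1)
    have hdN : (permDig r (j+1)).toNat < L.length := by push_cast at hd1; omega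
    rw [PySem.List.pyRange_neg_one_cons (by positivity)]
    have hidx : (((j:Nat):Int) + 1) - 1 = ((j:Nat):Int) := by ring
    have hstep : permBStep r (out, L, ((Nat.factorial (j+1) : Nat) : Int)) (((j+1:Nat)):Int)
        = (out ++ [L.getD (permDig r (j+1)).toNat 0],
           L.eraseIdx (permDig r (j+1)).toNat, ((Nat.factorial j : Nat) : Int)) := by
      unfold permBStep
      have hmd : PySem.Int.mod (PySem.Int.floordiv r ((Nat.factorial (j+1) : Nat) : Int))
          (((j+1:Nat):Int) + 1) = permDig r (j+1) := by
        rw [PySem.Int.floordiv_eq_ediv_of_pos hfpos,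
            PySem.Int.mod_eq_emod_of_pos (by positivity)]
        unfold permDig
        push_cast
        ring_nf
      simp only [hmd]
      have hpop : PySem.List.pop? L (permDig r (j+1))
          = some (L[(permDig r (j+1)).toNat]'hdN, L.eraseIdx (permDig r (j+1)).toNat) := by
        conv_lhs => rw [(Int.toNat_of_nonneg hd0).symm]
        exact PySem.List.pop?_natCast _ _ hdN
      rw [hpop]
      have hfact : PySem.Int.floordiv ((Nat.factorial (j+1) : Nat) : Int) ((j+1:Nat):Int)
          = ((Nat.factorial j : Nat) : Int) := by
        rw [PySem.Int.floordiv_eq_ediv_of_pos (by positivity), Nat.factorial_succ]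
        push_cast
        rw [Int.mul_ediv_cancel_left _ (by positivity)]
      simp only [hfact]
      rw [List.getD_eq_getElem _ _ hdN]
    push_cast at hstep ⊢
    simp only [List.foldl_cons, hidx, hstep]
    rw [ih (out ++ [L.getD (permDig r (j+1)).toNat 0]) (L.eraseIdx (permDig r (j+1)).toNat)
        (by rw [List.length_eraseIdx]; split_ifs <;> omega)]
    simp [permSel]

theorem A_eq_rel (m : Nat) (hm : 1 ≤ m) (r : Int) :
    perm_lex_unrank (m:Int) r = permRel r (m-1) := by
  unfold perm_lex_unrank
  have hpi0 : PySem.List.pySetD (List.replicate ((m:Int)).toNat (0:Int)) ((m:Int) - 1) 1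
      = List.replicate (m-1) 0 ++ permRel r 0 := by
    rw [show ((m:Int)) - 1 = ((m-1 : Nat) : Int) from by push_cast; omega,
        PySem.List.pySetD_natCast, Int.toNat_natCast,
        show m = (m-1)+1 from by omega, List.replicate_succ',
        List.set_append_right _ _ (by simp),
        show (m-1)+1-1 = m-1 from by omega]
    simp [permRel]
  rw [hpi0]
  have := A_loop m r (m-1) 1 (by omega) (by omega)
  rw [show ((1:Nat):Int) = (1:Int) from by norm_num, Nat.factorial_one] at this
  simpa using this

theorem B_eq_rel (m : Nat) (hm : 1 ≤ m) (r : Int) :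
    perm_lex_unrank_alt (m:Int) r = permRel r (m-1) := by
  unfold perm_lex_unrank_alt
  have hlen : (PySem.List.pyRange 1 ((m:Int)+1) 1).length = (m-1) + 1 := by
    rw [PySem.List.length_pyRange_one]
    omega
  have hfact : (if ((m:Int)) > 1 then pyFactorial ((m:Int) - 1) else 1)
      = ((Nat.factorial (m-1) : Nat) : Int) := by
    split_ifs with h
    · unfold pyFactorial
      congr 2
      omega
    · have : m = 1 := by omega
      subst this
      simp
  have hrange : PySem.List.pyRange ((m:Int) - 1) 0 (-1)
      = PySem.List.pyRange ((m-1 : Nat) : Int) 0 (-1) := by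
    congr 1
    push_cast
    omega
  rw [hfact, hrange]
  rw [B_loop r (m-1) [] _ hlen]
  rw [permSel_eq_map r (m-1) _ hlen]
  rw [List.nil_append]
  have hid : ∀ x ∈ permRel r (m-1),
      (PySem.List.pyRange 1 ((m:Int)+1) 1).getD (x.toNat - 1) 0 = x := by
    intro x hx
    obtain ⟨hx1, hx2⟩ := permRel_bounds r (m-1) x hx
    have hx2' : x ≤ (m:Int) := by push_cast at hx2; omega
    have hidx : x.toNat - 1 < (PySem.List.pyRange 1 ((m:Int)+1) 1).length := by
      rw [PySem.List.length_pyRange_one]; omega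
    rw [List.getD_eq_getElem _ _ hidx, PySem.List.getElem_pyRange_one]
    omega
  rw [List.map_congr_left hid]; simp

-- ===== VERDICT (by name: the statement is the Claim_ definition above) =====
theorem perm_lex_unrank_spec : Claim_equal_perm_lex_unrank := by
  intro n r _ hpre
  unfold Spec_perm_lex_unrank
  have hn : (1:Int) ≤ n := hpre
  obtain ⟨m, rfl⟩ : ∃ m : Nat, n = (m:Int) := ⟨n.toNat, (Int.toNat_of_nonneg (by omega)).symm⟩
  have hm : 1 ≤ m := by exact_mod_cast hn
  rw [A_eq_rel m hm r, B_eq_rel m hm r]
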